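-- pv_equiv track=rewrite | github.com/galid1/Algorithm | python/exams/21.11.06(wooatech)/4.py | solution
-- ===== SOURCE A (Python) =====
-- def solution(s):
--     answer = []
--     visited = [False for _ in range(len(s))]
--
--     idx, cnt = cal_start(s, visited)
--     answer.append(cnt)
--
--     while idx < len(s):
--         if visited[idx]:
--             idx += 1
--             continue
--
--         cur_c = s[idx]
--         cnt = 1
--         c_idx = idx+1
--
--         while c_idx < len(s):
--             if visited[c_idx] or cur_c != s[c_idx]:
--                 break
--
--             cnt += 1
--             c_idx += 1
--
--         answer.append(cnt)
--         idx = c_idx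
--
--     answer.sort()
--     return answer
--
-- def cal_start(s, v):
--     cur_c = s[0]
--     v[0] = True
--
--     idx = 1
--     cnt = 1
--     while idx < len(s):
--         if s[idx] != cur_c:
--             break
--
--         cnt += 1
--         v[idx] = True
--         idx += 1
--
--     r_idx = -1
--     while len(s) + r_idx > idx:
--         if s[r_idx] != cur_c:
--             break
--
--         cnt += 1
--         v[r_idx] = True
--         r_idx -= 1
--
--     return idx, cnt
-- ===== SOURCE B (Python) =====
-- def solution(s):
--     first = s[0]  # IndexError on empty input, like the original
--     counts = []
--     run = 0
--     prev = first
--     for c in s: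
--         if c == prev:
--             run += 1
--         else:
--             counts.append(run)
--             run = 1
--             prev = c
--     counts.append(run)
--     if len(counts) > 1 and s[-1] == first:
--         counts[0] += counts.pop()
--     return sorted(counts)
-- ===== Notes on version B (the rewrite author's own statement) =====
-- stated objective: simpler
-- what changed: Replaces the visited-array bookkeeping and three index-driven while loops (a circular forward+backward scan seeding the count, then a scan that skips visited cells) with one linear pass producing run lengths followed by a single post-step that merges the last run into the first when s[0]==s[-1] and there is more than one run.
import Mathlib
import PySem

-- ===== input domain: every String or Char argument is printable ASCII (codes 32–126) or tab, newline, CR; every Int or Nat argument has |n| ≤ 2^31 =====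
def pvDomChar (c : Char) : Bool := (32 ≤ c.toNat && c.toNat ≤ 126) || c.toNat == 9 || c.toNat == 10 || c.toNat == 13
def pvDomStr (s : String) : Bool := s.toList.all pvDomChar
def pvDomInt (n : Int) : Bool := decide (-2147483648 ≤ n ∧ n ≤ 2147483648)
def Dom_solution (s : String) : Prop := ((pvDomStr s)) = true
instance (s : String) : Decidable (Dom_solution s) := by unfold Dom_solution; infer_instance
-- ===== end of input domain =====

-- B replaces A's visited-array bookkeeping and three index-driven while loops with one
-- linear run-length pass plus a single circular-merge post-step (objective: simpler).

-- ===== PORT A =====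
-- forward while loop of cal_start: while idx < len(s) and s[idx] == cur_c
def calFwd (l : List Char) (c : Char) (idx : Nat) (cnt : Int) (v : List Bool) : Nat × Int × List Bool :=
  if idx < l.length then
    if l.getD idx ' ' ≠ c then (idx, cnt, v)
    else calFwd l c (idx + 1) (cnt + 1) (v.set idx true)
  else (idx, cnt, v)
  termination_by l.length - idx

-- backward while loop of cal_start; under the guard len+r > idx ≥ 0 the negative index r
-- denotes position len+r (Python's s[r] / v[r] for -len ≤ r < 0), which is exact here
def calBwd (l : List Char) (c : Char) (r : Int) (cnt : Int) (v : List Bool) (idx : Nat) : Int × List Bool :=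
  if (l.length : Int) + r > idx then
    if l.getD ((l.length : Int) + r).toNat ' ' ≠ c then (cnt, v)
    else calBwd l c (r - 1) (cnt + 1) (v.set ((l.length : Int) + r).toNat true) idx
  else (cnt, v)
  termination_by ((l.length : Int) + r - idx).toNat
  decreasing_by omega

-- inner while loop of solution: while c_idx < len(s) and not (visited or char differs)
def innerRun (l : List Char) (v : List Bool) (cur : Char) (j : Nat) (cnt : Int) : Int × Nat :=
  if j < l.length then
    if v.getD j false = true ∨ cur ≠ l.getD j ' ' then (cnt, j)
    else innerRun l v cur (j + 1) (cnt + 1)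
  else (cnt, j)
  termination_by l.length - j

-- needed by mainLoop's termination: the inner loop only moves its index forward
theorem innerRun_snd_ge (l : List Char) (v : List Bool) (cur : Char) (j : Nat) (cnt : Int) :
    j ≤ (innerRun l v cur j cnt).2 := by
  unfold innerRun
  split
  · split
    · simp
    · have := innerRun_snd_ge l v cur (j + 1) (cnt + 1)
      omega
  · simp
  termination_by l.length - j

-- outer while loop of solution
def mainLoop (l : List Char) (v : List Bool) (idx : Nat) (acc : List Int) : List Int :=
  if idx < l.length then
    if v.getD idx false then mainLoop l v (idx + 1) acc
    else
      let cur := l.getD idx ' '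
      let p := innerRun l v cur (idx + 1) 1
      mainLoop l v p.2 (acc ++ [p.1])
  else acc
  termination_by l.length - idx
  decreasing_by
  · omega
  · have := innerRun_snd_ge l v (l.getD idx ' ') (idx + 1) 1; omega

def solution (s : String) : List Int :=
  let l := s.toList
  match PySem.Str.pyGet? s 0 with
  | none => []   -- Python raises IndexError (s[0] on empty input); excluded by Pre_solution
  | some c =>
    let v := (List.replicate l.length false).set 0 true
    let t := calFwd l c 1 1 v
    let t2 := calBwd l c (-1) t.2.1 t.2.2 t.1
    PySem.List.sorted (mainLoop l t2.2 t.1 [t2.1]) (fun x => x) false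

-- ===== PORT B =====
-- the single for-loop of Source B, carrying (counts, prev, run); returns (counts, run)
def bLoop (cs : List Char) (prev : Char) (run : Int) (counts : List Int) : List Int × Int :=
  match cs with
  | [] => (counts, run)
  | ch :: t =>
    if ch = prev then bLoop t prev (run + 1) counts
    else bLoop t ch 1 (counts ++ [run])

def solution_alt (s : String) : List Int :=
  match PySem.Str.pyGet? s 0 with
  | none => []   -- Python raises IndexError (s[0] on empty input); excluded by Pre_solution
  | some first =>
    let p := bLoop s.toList first 0 []
    let counts := p.1 ++ [p.2]
    let counts :=
      if counts.length > 1 ∧ PySem.Str.pyGet? s (-1) = some first then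
        counts.dropLast.set 0 (counts.dropLast.getD 0 0 + counts.getLastD 0)
      else counts
    PySem.List.sorted counts (fun x => x) false

-- ===== PRECONDITION & SPEC =====
-- Pre_ excludes only the empty string, on which both A and B raise IndexError (s[0]).
def Pre_solution (s : String) : Prop := s.toList ≠ []
instance (s : String) : Decidable (Pre_solution s) := by unfold Pre_solution; infer_instance
def pvWitness_solution : String := "aabcaa"

def Spec_solution (s : String) (out : List Int) : Prop := out = solution_alt s
instance (s : String) (out : List Int) : Decidable (Spec_solution s out) := by unfold Spec_solution; infer_instance

-- ===== CLAIM (what is proved, stated in full; the proofs are below) =====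
def Claim_equal_solution : Prop := ∀ (s : String), Dom_solution s → Pre_solution s → Spec_solution s (solution s)

-- ===== LEMMAS AND PROOFS =====

-- visited-array abstractions: positions marked True by the forward / backward scans
def markRange (v : List Bool) (i : Nat) : Nat → List Bool
  | 0 => v
  | k + 1 => markRange (v.set i true) (i + 1) k

def markDown (v : List Bool) (j : Nat) : Nat → List Bool
  | 0 => v
  | k + 1 => markDown (v.set j true) (j - 1) k

theorem getD_set_bool (v : List Bool) (i p : Nat) (h : i < v.length) :
    (v.set i true).getD p false = if i = p then true else v.getD p false := by
  simp only [List.getD_eq_getElem?_getD, List.getElem?_set, h]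
  split <;> simp_all

theorem length_markRange (v : List Bool) (i : Nat) : ∀ k, (markRange v i k).length = v.length := by
  intro k
  induction k generalizing v i with
  | zero => rfl
  | succ k ih => rw [markRange, ih]; exact List.length_set ..

theorem getD_markRange (i k : Nat) : ∀ (v : List Bool), i + k ≤ v.length → ∀ p,
    ((markRange v i k).getD p false = true ↔ ((i ≤ p ∧ p < i + k) ∨ v.getD p false = true)) := by
  induction k generalizing i with
  | zero =>
    intro v _ p
    rw [markRange]
    constructor
    · exact fun h => Or.inr h
    · rintro (⟨h1, h2⟩ | h)
      · omega
      · exact h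
  | succ k ih =>
    intro v hlen p
    rw [markRange, ih (i + 1) (v.set i true) (by simp; omega) p,
        getD_set_bool v i p (by omega)]
    by_cases hip : i = p
    · simp [hip]
    · simp only [hip, if_false]
      constructor
      · rintro (⟨h1, h2⟩ | h)
        · exact Or.inl ⟨by omega, by omega⟩
        · exact Or.inr h
      · rintro (⟨h1, h2⟩ | h)
        · exact Or.inl ⟨by omega, by omega⟩
        · exact Or.inr h

theorem getD_markDown (k : Nat) : ∀ (v : List Bool) (j : Nat), j < v.length → k ≤ j + 1 → ∀ p,
    ((markDown v j k).getD p false = true ↔ ((j + 1 - k ≤ p ∧ p ≤ j) ∨ v.getD p false = true)) := by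
  induction k with
  | zero =>
    intro v j _ _ p
    rw [markDown]
    constructor
    · exact fun h => Or.inr h
    · rintro (⟨h1, h2⟩ | h)
      · omega
      · exact h
  | succ k ih =>
    intro v j hj hk p
    rw [markDown, ih (v.set j true) (j - 1) (by simp; omega) (by omega) p,
        getD_set_bool v j p hj]
    by_cases hip : j = p
    · simp [hip]
    · simp only [hip, if_false]
      constructor
      · rintro (⟨h1, h2⟩ | h)
        · exact Or.inl ⟨by omega, by omega⟩
        · exact Or.inr h
      · rintro (⟨h1, h2⟩ | h)
        · exact Or.inl ⟨by omega, by omega⟩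
        · exact Or.inr h

theorem markRange_markRange (a : Nat) : ∀ (v : List Bool) (i b : Nat),
    markRange (markRange v i a) (i + a) b = markRange v i (a + b) := by
  induction a with
  | zero => intro v i b; simp [markRange]
  | succ a ih =>
    intro v i b
    rw [markRange, show i + (a + 1) = (i + 1) + a by omega, ih (v.set i true) (i + 1) b,
        show a + 1 + b = (a + b) + 1 by omega, markRange]

-- length of the run of c starting at position idx
def fLen (l : List Char) (c : Char) (idx : Nat) : Nat := ((l.drop idx).takeWhile (fun x => x == c)).length

theorem calFwd_eq (l : List Char) (c : Char) : ∀ (idx : Nat) (cnt : Int) (v : List Bool),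
    calFwd l c idx cnt v = (idx + fLen l c idx, cnt + fLen l c idx, markRange v idx (fLen l c idx)) := by
  have H : ∀ (m idx : Nat) (cnt : Int) (v : List Bool), l.length - idx ≤ m →
      calFwd l c idx cnt v = (idx + fLen l c idx, cnt + fLen l c idx, markRange v idx (fLen l c idx)) := by
    intro m
    induction m with
    | zero =>
      intro idx cnt v hm
      have h : ¬ idx < l.length := by omega
      have hf : fLen l c idx = 0 := by
        simp [fLen, List.drop_eq_nil_of_le (by omega : l.length ≤ idx)]
      rw [calFwd, if_neg h, hf]
      simp [markRange]
    | succ m ih =>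
      intro idx cnt v hm
      by_cases h : idx < l.length
      · rw [calFwd, if_pos h]
        have hgd : l.getD idx ' ' = l[idx] := List.getD_eq_getElem l ' ' h
        have hd : l.drop idx = l[idx] :: l.drop (idx + 1) := List.drop_eq_getElem_cons h
        by_cases hc : l[idx] = c
        · rw [if_neg (by simp [List.getD_eq_getElem?_getD, List.getElem?_eq_getElem h, hc])]
          rw [ih (idx + 1) (cnt + 1) (v.set idx true) (by omega)]
          have hf : fLen l c idx = fLen l c (idx + 1) + 1 := by
            simp only [fLen]; rw [hd, List.takeWhile_cons]; simp [hc]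
          rw [hf]
          simp only [Prod.mk.injEq, markRange]
          exact ⟨by omega, by push_cast; ring, trivial⟩
        · rw [if_pos (by simp [List.getD_eq_getElem?_getD, List.getElem?_eq_getElem h, hc])]
          have hf : fLen l c idx = 0 := by
            simp only [fLen]; rw [hd, List.takeWhile_cons]; simp [hc]
          rw [hf]
          simp [markRange]
      · have hf : fLen l c idx = 0 := by
          simp [fLen, List.drop_eq_nil_of_le (by omega : l.length ≤ idx)]
        rw [calFwd, if_neg h, hf]
        simp [markRange]
  intro idx cnt v
  exact H (l.length - idx) idx cnt v le_rfl

-- linear run-length counts of a character list (the common specification of both programs)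
def runsCounts (xs : List Char) : List Int :=
  match xs with
  | [] => []
  | c :: t => ((1 : Int) + (t.takeWhile (fun x => x == c)).length) :: runsCounts (t.dropWhile (fun x => x == c))
  termination_by xs.length
  decreasing_by
    have := (List.dropWhile_suffix (l := t) (fun x => x == c)).length_le
    simp; omega

theorem dropWhile_eq_drop (p : Char → Bool) (l : List Char) :
    l.dropWhile p = l.drop (l.takeWhile p).length := by
  calc l.dropWhile p
      = (l.takeWhile p ++ l.dropWhile p).drop (l.takeWhile p).length := List.drop_left.symm
    _ = l.drop (l.takeWhile p).length := by rw [List.takeWhile_append_dropWhile]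

theorem runsCounts_replicate (c : Char) (b : Nat) (hb : 0 < b) :
    runsCounts (List.replicate b c) = [(b : Int)] := by
  obtain ⟨b', rfl⟩ : ∃ b', b = b' + 1 := ⟨b - 1, by omega⟩
  rw [List.replicate_succ, runsCounts]
  simp [List.takeWhile_replicate, List.dropWhile_replicate, runsCounts]
  push_cast; ring

theorem runsCounts_append_replicate (c : Char) : ∀ (xs : List Char) (hne : xs ≠ []),
    xs.getLast hne ≠ c → ∀ (b : Nat), 0 < b →
    runsCounts (xs ++ List.replicate b c) = runsCounts xs ++ [(b : Int)] := by
  have H : ∀ (n : Nat) (xs : List Char), xs.length ≤ n → ∀ (hne : xs ≠ []),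
      xs.getLast hne ≠ c → ∀ (b : Nat), 0 < b →
      runsCounts (xs ++ List.replicate b c) = runsCounts xs ++ [(b : Int)] := by
    intro n
    induction n with
    | zero => intro xs hl hne; exact absurd (List.eq_nil_of_length_eq_zero (by omega)) hne
    | succ n ih =>
      intro xs hl hne hlast b hb
      match xs, hne with
      | x :: t, _ =>
        rw [List.cons_append, runsCounts, runsCounts]
        by_cases hrest : t.dropWhile (fun y => y == x) = []
        · have hall : ∀ y ∈ t, (y == x) = true := List.dropWhile_eq_nil_iff.mp hrest
          have htake : t.takeWhile (fun y => y == x) = t := List.takeWhile_eq_self_iff.mpr hall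
          have hxc : x ≠ c := by
            have hmem := List.getLast_mem (l := x :: t) (by simp)
            rcases List.mem_cons.mp hmem with h | h
            · rw [← h]; exact hlast
            · have := hall _ h
              simp only [beq_iff_eq] at this
              rw [← this]; exact hlast
          have hcx : ((c == x) = false) := by simp [beq_eq_false_iff_ne]; exact fun h => hxc h.symm
          rw [List.takeWhile_append, List.dropWhile_append]
          rw [if_pos (by rw [htake]), if_pos (by rw [hrest]; rfl)]
          rw [List.takeWhile_replicate, List.dropWhile_replicate, if_neg (by simp [hcx]),
              if_neg (by simp [hcx]), runsCounts_replicate c b hb, htake, hrest]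
          simp [runsCounts]
        · have hlen : ¬ (t.takeWhile (fun y => y == x)).length = t.length := by
            intro hlen
            have := (List.takeWhile_prefix (l := t) (fun y => y == x)).eq_of_length hlen
            rw [dropWhile_eq_drop, this] at hrest
            simp at hrest
          have htne : t ≠ [] := by intro h; rw [h] at hrest; simp at hrest
          have hlast' : (t.dropWhile (fun y => y == x)).getLast hrest ≠ c := by
            obtain ⟨pre, hpre⟩ := List.dropWhile_suffix (l := t) (fun y => y == x)
            have h1 : (x :: t).getLast (by simp) = t.getLast htne := List.getLast_cons htne
            have h2 : t.getLast htne = (t.dropWhile (fun y => y == x)).getLast hrest := by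
              have e1 : t.getLast? = (t.dropWhile (fun y => y == x)).getLast? := by
                conv_lhs => rw [← hpre]
                exact List.getLast?_append_of_ne_nil pre hrest
              rw [List.getLast?_eq_some_getLast htne, List.getLast?_eq_some_getLast hrest] at e1
              exact Option.some.inj e1
            rw [← h2, ← h1]; exact hlast
          have hsz : (t.dropWhile (fun y => y == x)).length ≤ n := by
            have := (List.dropWhile_suffix (l := t) (fun y => y == x)).length_le
            simp at hl; omega
          rw [List.takeWhile_append, List.dropWhile_append, if_neg hlen,
              if_neg (by simpa using hrest)]
          rw [ih _ hsz hrest hlast' b hb]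
          simp
  intro xs hne hlast b hb
  exact H xs.length xs le_rfl hne hlast b hb


-- maximality of takeWhile: the element just past it fails the predicate
theorem takeWhile_max (p : Char → Bool) : ∀ (l : List Char) (h : (l.takeWhile p).length < l.length),
    p (l[(l.takeWhile p).length]) = false := by
  intro l
  induction l with
  | nil => intro h; simp at h
  | cons a t ih =>
    intro h
    by_cases hp : p a = true
    · have ht : ((a :: t).takeWhile p) = a :: t.takeWhile p := by simp [List.takeWhile_cons, hp]
      simp only [ht, List.length_cons, List.length_take] at h ⊢
      simpa using ih (by simpa using h)
    · have ht : ((a :: t).takeWhile p) = [] := by simp [List.takeWhile_cons, hp]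
      simp only [ht, List.length_nil, List.getElem_cons_zero]
      simpa using hp

-- elements inside takeWhile satisfy the predicate (getElem form)
theorem takeWhile_getElem (p : Char → Bool) (l : List Char) (i : Nat) (h : i < (l.takeWhile p).length) :
    p (l[i]'(Nat.lt_of_lt_of_le h (List.takeWhile_prefix p).length_le)) = true := by
  have hpre := List.takeWhile_prefix (l := l) p
  have hg := List.IsPrefix.getElem hpre h
  have hmem : (l.takeWhile p)[i] ∈ l.takeWhile p := List.getElem_mem h
  have := List.mem_takeWhile_imp hmem
  rwa [hg] at this

theorem innerRun_eq (l : List Char) (v : List Bool) (f b : Nat)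
    (hv : ∀ p, p < l.length → (v.getD p false = true ↔ (p < f ∨ l.length - b ≤ p)))
    (cur : Char) : ∀ (j : Nat) (cnt : Int), f < j →
    innerRun l v cur j cnt =
      (cnt + (((l.take (l.length - b)).drop j).takeWhile (fun x => x == cur)).length,
       j + (((l.take (l.length - b)).drop j).takeWhile (fun x => x == cur)).length) := by
  have H : ∀ (m j : Nat) (cnt : Int), l.length - j ≤ m → f < j →
      innerRun l v cur j cnt =
        (cnt + (((l.take (l.length - b)).drop j).takeWhile (fun x => x == cur)).length,
         j + (((l.take (l.length - b)).drop j).takeWhile (fun x => x == cur)).length) := by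
    intro m
    induction m with
    | zero =>
      intro j cnt hm hj
      have h : ¬ j < l.length := by omega
      have hk : ((l.take (l.length - b)).drop j).takeWhile (fun x => x == cur) = [] := by
        rw [List.drop_eq_nil_of_le (by simp; omega)]; rfl
      rw [innerRun, if_neg h, hk]
      simp
    | succ m ih =>
      intro j cnt hm hj
      by_cases h : j < l.length
      · by_cases hb2 : l.length - b ≤ j
        · have hk : ((l.take (l.length - b)).drop j).takeWhile (fun x => x == cur) = [] := by
            rw [List.drop_eq_nil_of_le (by simp; omega)]; rfl
          rw [innerRun, if_pos h, if_pos (Or.inl ((hv j h).mpr (Or.inr hb2))), hk]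
          simp
        · have hjlt : j < (l.take (l.length - b)).length := by simp; omega
          have hd : (l.take (l.length - b)).drop j =
              l[j]'h :: (l.take (l.length - b)).drop (j + 1) := by
            rw [List.drop_eq_getElem_cons hjlt, List.getElem_take]
          have hvj : ¬ v.getD j false = true := by
            rw [hv j h]; push_neg; constructor <;> omega
          have hgd : l.getD j ' ' = l[j]'h := List.getD_eq_getElem l ' ' h
          by_cases hc : l[j]'h = cur
          · rw [innerRun, if_pos h, if_neg (by
                  rintro (hh | hh)
                  · exact hvj hh
                  · rw [hgd] at hh; exact hh hc.symm),
                ih (j + 1) (cnt + 1) (by omega) (by omega)]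
            rw [hd, List.takeWhile_cons]
            simp only [hc, beq_self_eq_true, if_pos]
            simp only [List.length_cons, Prod.mk.injEq]
            constructor
            · push_cast; ring
            · omega
          · have hk : ((l.take (l.length - b)).drop j).takeWhile (fun x => x == cur) = [] := by
              rw [hd, List.takeWhile_cons]
              simp [hc]
            rw [innerRun, if_pos h, if_pos (Or.inr (by rw [hgd]; exact fun hh => hc hh.symm)), hk]
            simp
      · have hk : ((l.take (l.length - b)).drop j).takeWhile (fun x => x == cur) = [] := by
          rw [List.drop_eq_nil_of_le (by simp; omega)]; rfl
        rw [innerRun, if_neg h, hk]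
        simp
  intro j cnt hj
  exact H (l.length - j) j cnt le_rfl hj

theorem mainLoop_eq (l : List Char) (v : List Bool) (f b : Nat)
    (hv : ∀ p, p < l.length → (v.getD p false = true ↔ (p < f ∨ l.length - b ≤ p))) :
    ∀ (idx : Nat) (acc : List Int), f ≤ idx →
    mainLoop l v idx acc = acc ++ runsCounts ((l.take (l.length - b)).drop idx) := by
  have H : ∀ (m idx : Nat) (acc : List Int), l.length - idx ≤ m → f ≤ idx →
      mainLoop l v idx acc = acc ++ runsCounts ((l.take (l.length - b)).drop idx) := by
    intro m
    induction m with
    | zero =>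
      intro idx acc hm hf2
      have h : ¬ idx < l.length := by omega
      rw [mainLoop, if_neg h, List.drop_eq_nil_of_le (by simp; omega), runsCounts]
      simp
    | succ m ih =>
      intro idx acc hm hf2
      by_cases h : idx < l.length
      · by_cases hb2 : l.length - b ≤ idx
        · have hvt : v.getD idx false = true := (hv idx h).mpr (Or.inr hb2)
          rw [mainLoop, if_pos h, if_pos hvt, ih (idx + 1) acc (by omega) (by omega),
              List.drop_eq_nil_of_le (by simp; omega), List.drop_eq_nil_of_le (by simp; omega)]
        · have hvf : ¬ v.getD idx false = true := by
            rw [hv idx h]; push_neg; constructor <;> omega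
          have hjlt : idx < (l.take (l.length - b)).length := by simp; omega
          have hd : (l.take (l.length - b)).drop idx =
              l[idx]'h :: (l.take (l.length - b)).drop (idx + 1) := by
            rw [List.drop_eq_getElem_cons hjlt, List.getElem_take]
          have hgd : l.getD idx ' ' = l[idx]'h := List.getD_eq_getElem l ' ' h
          rw [mainLoop]
          simp only [if_pos h, if_neg hvf]
          rw [innerRun_eq l v f b hv (l.getD idx ' ') (idx + 1) 1 (by omega)]
          rw [ih _ (acc ++ [_]) (by omega) (by omega)]
          simp only []
          rw [hgd, hd, runsCounts, dropWhile_eq_drop, List.drop_drop,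
              List.append_assoc, List.singleton_append]
      · rw [mainLoop, if_neg h, List.drop_eq_nil_of_le (by simp; omega), runsCounts]
        simp
  intro idx acc hf2
  exact H (l.length - idx) idx acc le_rfl hf2

theorem bLoop_eq : ∀ (cs : List Char) (prev : Char) (run : Int) (counts : List Int),
    (bLoop cs prev run counts).1 ++ [(bLoop cs prev run counts).2] =
      counts ++ (run + ((cs.takeWhile (fun x => x == prev)).length : Int)) ::
        runsCounts (cs.dropWhile (fun x => x == prev)) := by
  intro cs
  induction cs with
  | nil => intro prev run counts; simp [bLoop, runsCounts]
  | cons ch t ih =>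
    intro prev run counts
    by_cases h : ch = prev
    · rw [bLoop, if_pos h, ih]
      simp [List.takeWhile_cons, List.dropWhile_cons, h]
      push_cast; ring
    · rw [bLoop, if_neg h, ih]
      simp [List.takeWhile_cons, List.dropWhile_cons, h, runsCounts]

-- calBwd characterization (case: the first run does not cover the whole string)
theorem rev_run_max (l : List Char) (c : Char) (tw : Nat)
    (htw : tw = (l.reverse.takeWhile (fun x => x == c)).length) (h : tw < l.length) :
    l[l.length - 1 - tw]'(by omega) ≠ c := by
  subst htw
  have h' : (l.reverse.takeWhile (fun x => x == c)).length < l.reverse.length := by simpa using h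
  have hm := takeWhile_max (fun x => x == c) l.reverse h'
  rw [List.getElem_reverse] at hm
  intro hc
  rw [hc] at hm
  simp at hm

theorem rev_run_val (l : List Char) (c : Char) (tw q : Nat)
    (htw : tw = (l.reverse.takeWhile (fun x => x == c)).length) (h : q < tw) :
    l[l.length - 1 - q]'(by
      have := (List.takeWhile_prefix (l := l.reverse) (fun x => x == c)).length_le
      simp at this; omega) = c := by
  subst htw
  have hv := takeWhile_getElem (fun x => x == c) l.reverse q h
  rw [List.getElem_reverse] at hv
  simpa using hv

theorem calBwd_eq (l : List Char) (c : Char) (f : Nat) (hf : f < l.length)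
    (tw : Nat) (htw : tw = (l.reverse.takeWhile (fun x => x == c)).length)
    (hmax : tw + f < l.length) :
    ∀ (q : Nat) (cnt : Int) (v : List Bool), q ≤ tw →
    calBwd l c (-1 - (q : Int)) cnt v f =
      (cnt + ((tw - q : Nat) : Int), markDown v (l.length - 1 - q) (tw - q)) := by
  have H : ∀ (k q : Nat) (cnt : Int) (v : List Bool), q ≤ tw → tw - q = k →
      calBwd l c (-1 - (q : Int)) cnt v f =
        (cnt + ((tw - q : Nat) : Int), markDown v (l.length - 1 - q) (tw - q)) := by
    intro k
    induction k with
    | zero =>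
      intro q cnt v hq hk
      have hq' : q = tw := by omega
      subst hq'
      rw [calBwd]
      by_cases hg : (l.length : Int) + (-1 - (q : Int)) > (f : Int)
      · have hpos : ((l.length : Int) + (-1 - (q : Int))).toNat = l.length - 1 - q := by omega
        have hlt : l.length - 1 - q < l.length := by omega
        have hne := rev_run_max l c q htw (by omega)
        rw [if_pos hg, if_pos (by rw [hpos, List.getD_eq_getElem l ' ' hlt]; exact hne)]
        simp [markDown]
      · rw [if_neg hg]
        simp [markDown]
    | succ k ih =>
      intro q cnt v hq hk
      have hqlt : q < tw := by omega
      have hg : (l.length : Int) + (-1 - (q : Int)) > (f : Int) := by omega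
      have hpos : ((l.length : Int) + (-1 - (q : Int))).toNat = l.length - 1 - q := by omega
      have hlt : l.length - 1 - q < l.length := by omega
      have hval := rev_run_val l c tw q htw hqlt
      rw [calBwd, if_pos hg, if_neg (by
            rw [hpos, List.getD_eq_getElem l ' ' hlt, hval]
            exact fun hh => hh rfl)]
      rw [hpos]
      have harg : (-1 - (q : Int)) - 1 = -1 - ((q + 1 : Nat) : Int) := by push_cast; ring
      rw [harg, ih (q + 1) (cnt + 1) (v.set (l.length - 1 - q) true) (by omega) (by omega)]
      have e1 : tw - q = (tw - (q + 1)) + 1 := by omega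
      rw [e1, markDown]
      have e2 : l.length - 1 - q - 1 = l.length - 1 - (q + 1) := by omega
      rw [e2]
      simp only [Prod.mk.injEq]
      exact ⟨by push_cast; ring, trivial⟩
  intro q cnt v hq
  exact H (tw - q) q cnt v hq rfl

-- ===== VERDICT (by name: the statement is the Claim_ definition above) =====
-- trailing run of c is an all-c suffix
theorem drop_eq_replicate_of_rev_takeWhile (l : List Char) (c : Char) (tw : Nat)
    (htw : tw = (l.reverse.takeWhile (fun x => x == c)).length) :
    l.drop (l.length - tw) = List.replicate tw c := by
  have h1 : l.reverse.take tw = l.reverse.takeWhile (fun x => x == c) := by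
    conv_lhs => rw [← List.takeWhile_append_dropWhile (p := fun x => x == c) (l := l.reverse), htw]
    exact List.take_left ..
  have h2 : l.reverse.take tw = List.replicate tw c := by
    rw [h1]
    refine List.eq_replicate_iff.mpr ⟨htw.symm, ?_⟩
    intro x hx
    have := List.mem_takeWhile_imp hx
    simpa using this
  have h3 : (l.reverse.take tw).reverse = l.drop (l.length - tw) := by
    rw [List.reverse_take]; simp
  rw [← h3, h2, List.reverse_replicate]

theorem solution_spec : Claim_equal_solution := by
  intro s _ hpre
  show solution s = solution_alt s
  obtain ⟨c, tl, hlt⟩ : ∃ c tl, s.toList = c :: tl := by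
    cases h : s.toList with
    | nil => exact absurd h hpre
    | cons a t => exact ⟨a, t, rfl⟩
  have h0 : PySem.Str.pyGet? s 0 = some c := by simp [pysem, hlt]
  have hm1 : PySem.Str.pyGet? s (-1) = s.toList.getLast? := by simp [pysem]
  -- abbreviations
  set l := s.toList with hls
  set n := l.length with hn
  set f := (l.takeWhile (fun x => x == c)).length with hfdef
  have hf1 : 1 ≤ f := by rw [hfdef, hlt, List.takeWhile_cons]; simp
  have hfn : f ≤ n := by rw [hfdef, hn]; exact (List.takeWhile_prefix _).length_le
  have hfeq : f = 1 + fLen l c 1 := by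
    rw [hfdef, fLen, hlt]
    simp [List.takeWhile_cons]
    omega
  -- A side: cal_start forward pass
  have hA1 : calFwd l c 1 1 ((List.replicate n false).set 0 true) =
      (f, (f : Int), markRange (List.replicate n false) 0 f) := by
    rw [calFwd_eq]
    have hm : markRange ((List.replicate n false).set 0 true) 1 (fLen l c 1) =
        markRange (List.replicate n false) 0 f := by
      have := markRange_markRange 1 (List.replicate n false) 0 (fLen l c 1)
      simp only [markRange] at this
      rw [this, ← hfeq]
    rw [hm]
    refine Prod.ext (by simp; omega) (Prod.ext (by simp; rw [hfeq]; push_cast; ring) rfl)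
  by_cases hcase : f = n
  · -- the first run covers the whole string: no merge on either side
    have hdropf : l.drop f = [] := List.drop_eq_nil_of_le (by omega)
    have hA2 : calBwd l c (-1) (f : Int) (markRange (List.replicate n false) 0 f) f =
        ((f : Int), markRange (List.replicate n false) 0 f) := by
      rw [calBwd, if_neg (by rw [← hn]; omega)]
    have hA3 : mainLoop l (markRange (List.replicate n false) 0 f) f [(f : Int)] = [(f : Int)] := by
      rw [mainLoop, if_neg (by omega)]
    have hB : (bLoop l c 0 []).1 ++ [(bLoop l c 0 []).2] = [(f : Int)] := by
      rw [bLoop_eq, dropWhile_eq_drop, ← hfdef, hdropf, runsCounts]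
      simp
    rw [solution, solution_alt]
    simp only [h0, ← hls]
    rw [hA1]
    simp only []
    rw [hA2, hA3, hB]
    simp
  · -- f < n: there is more than one run
    have hflt : f < n := by omega
    set tw := (l.reverse.takeWhile (fun x => x == c)).length with htw
    have htwn : tw + f < n := by
      by_contra hcon
      push_neg at hcon
      have htwle : tw ≤ n := by rw [htw, hn]; simpa using (List.takeWhile_prefix (l := l.reverse) _).length_le
      have hq : n - 1 - f < tw := by omega
      have hval := rev_run_val l c tw (n - 1 - f) htw hq
      have he : l.length - 1 - (n - 1 - f) = f := by omega
      simp only [he] at hval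
      have hmax := takeWhile_max (fun x => x == c) l (by rw [← hfdef, ← hn]; omega)
      simp only [← hfdef] at hmax
      rw [hval] at hmax
      simp at hmax
    -- the visited array after cal_start
    have hv : ∀ p, p < l.length →
        ((markDown (markRange (List.replicate n false) 0 f) (n - 1) tw).getD p false = true ↔
          (p < f ∨ l.length - tw ≤ p)) := by
      intro p hp
      rw [getD_markDown tw (markRange (List.replicate n false) 0 f) (n - 1)
            (by rw [length_markRange]; simp [hn]; omega) (by omega) p,
          getD_markRange 0 f (List.replicate n false) (by simp; omega) p]
      have hrep : (List.replicate n false).getD p false = false := by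
        simp only [List.getD_eq_getElem?_getD, List.getElem?_replicate]
        split <;> rfl
      rw [hrep]
      simp only [Bool.false_eq_true, or_false]
      rw [← hn]
      constructor
      · rintro (⟨h1, h2⟩ | ⟨h1, h2⟩)
        · right; omega
        · left; omega
      · rintro (h1 | h1)
        · right; omega
        · left; omega
    have hA2 : calBwd l c (-1) (f : Int) (markRange (List.replicate n false) 0 f) f =
        ((f : Int) + (tw : Int), markDown (markRange (List.replicate n false) 0 f) (n - 1) tw) := by
      have h00 : (-1 : Int) = -1 - ((0 : Nat) : Int) := by simp
      rw [h00, calBwd_eq l c f (by omega) tw htw (by omega) 0 (f : Int)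
            (markRange (List.replicate n false) 0 f) (by omega)]
      simp [← hn]
    have hA3 : mainLoop l (markDown (markRange (List.replicate n false) 0 f) (n - 1) tw) f
        [(f : Int) + (tw : Int)] =
        ((f : Int) + (tw : Int)) :: runsCounts ((l.take (n - tw)).drop f) := by
      rw [mainLoop_eq l _ f tw hv f [(f : Int) + (tw : Int)] le_rfl, ← hn]
      simp
    have hB : (bLoop l c 0 []).1 ++ [(bLoop l c 0 []).2] =
        (f : Int) :: runsCounts (l.drop f) := by
      rw [bLoop_eq, dropWhile_eq_drop, ← hfdef]
      simp
    have hlast : l.getLast? = some (l[n - 1]'(by omega)) := by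
      rw [List.getLast?_eq_some_getLast (by rw [hlt]; simp)]
      congr 1
      exact List.getLast_eq_getElem _
    have hdne : l.drop f ≠ [] := by
      have hld : (l.drop f).length = l.length - f := List.length_drop ..
      intro h
      rw [h] at hld
      simp at hld
      omega
    obtain ⟨d, dt, hdd⟩ : ∃ d dt, l.drop f = d :: dt := by
      cases h : l.drop f with
      | nil => exact absurd h hdne
      | cons a t => exact ⟨a, t, rfl⟩
    rw [solution, solution_alt]
    simp only [h0, ← hls]
    rw [hA1]
    simp only []
    rw [hA2, hA3, hB]
    by_cases htw0 : tw = 0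
    · -- last character differs from the first: no circular merge
      have hne := rev_run_max l c tw htw (by omega)
      rw [if_neg (by
            rintro ⟨-, hco⟩
            rw [hm1, hlast] at hco
            have : l[n - 1]'(by omega) = c := by injection hco
            simp only [htw0, Nat.sub_zero] at hne
            exact hne this)]
      rw [htw0]
      simp only [Nat.sub_zero, Nat.cast_zero, add_zero, hn, List.take_length]
    · -- circular merge: last run is folded into the first on both sides
      have hgl : l[n - 1]'(by omega) = c := by
        have := rev_run_val l c tw 0 htw (by omega)
        simpa using this
      have hMlen : ((l.take (n - tw)).drop f).length = n - tw - f := by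
        simp [← hn]
      have hMne : (l.take (n - tw)).drop f ≠ [] := by
        intro h
        rw [h] at hMlen
        simp at hMlen
        omega
      have hMlast : ((l.take (n - tw)).drop f).getLast hMne ≠ c := by
        rw [List.getLast_eq_getElem, List.getElem_drop, List.getElem_take]
        have h2 : f + (((l.take (n - tw)).drop f).length - 1) = l.length - 1 - tw := by
          rw [hMlen, ← hn]; omega
        simp only [h2]
        exact rev_run_max l c tw htw (by omega)
      have hdecomp : l.drop f = (l.take (n - tw)).drop f ++ List.replicate tw c := by
        conv_lhs => rw [← List.take_append_drop (n - tw) l]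
        rw [List.drop_append_of_le_length (by simp [← hn]; omega),
            drop_eq_replicate_of_rev_takeWhile l c tw htw]
      have hruns : runsCounts (l.drop f) = runsCounts ((l.take (n - tw)).drop f) ++ [(tw : Int)] := by
        rw [hdecomp]
        exact runsCounts_append_replicate c _ hMne hMlast tw (by omega)
      rw [if_pos (by
            constructor
            · rw [hruns]; simp
            · rw [hm1, hlast, hgl])]
      rw [hruns, ← List.cons_append]
      rw [List.dropLast_concat]
      have hgld : (((f : Int) :: runsCounts ((l.take (n - tw)).drop f)) ++ [(tw : Int)]).getLastD 0 = (tw : Int) := by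
        rw [List.getLastD_eq_getLast?, List.getLast?_concat]
        rfl
      rw [hgld]
      simp
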